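-- pv_equiv track=rewrite | github.com/namuwikilover/beakjun | 1차원 배열 사용하기/OX퀴즈.py | Quize
-- ===== SOURCE A (Python) =====
-- def Quize(string):
--     c=0
--     s=0
--     for i in range(len(string)):
--         if string[i]=='O':
--             c+=1
--             s+=c
--         else:
--             c=0
--             s+=c
--     return s
-- ===== SOURCE B (Python) =====
-- def Quize(string):
--     runs = []
--     k = 0
--     for ch in string:
--         if ch == 'O':
--             k += 1
--         else:
--             if k:
--                 runs.append(k)
--             k = 0
--     if k:
--         runs.append(k)
--     return sum(k * (k + 1) // 2 for k in runs)
-- ===== Notes on version B (the rewrite author's own statement) =====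
-- stated objective: alternative
-- what changed: B replaces per-character streak-score accumulation with a run-length scan that collects maximal runs of 'O' and sums the triangular closed form k*(k+1)//2 per run.
import Mathlib
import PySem

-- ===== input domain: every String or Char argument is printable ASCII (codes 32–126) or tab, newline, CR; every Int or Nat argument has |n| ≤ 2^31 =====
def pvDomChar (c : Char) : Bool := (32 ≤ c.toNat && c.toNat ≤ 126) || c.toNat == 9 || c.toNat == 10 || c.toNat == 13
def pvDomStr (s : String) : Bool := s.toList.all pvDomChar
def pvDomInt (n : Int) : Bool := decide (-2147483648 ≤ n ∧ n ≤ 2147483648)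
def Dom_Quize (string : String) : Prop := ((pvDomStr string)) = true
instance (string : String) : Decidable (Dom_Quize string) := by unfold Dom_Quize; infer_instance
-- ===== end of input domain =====

-- B replaces per-character streak-score accumulation with a run-length scan summing k*(k+1)//2 per maximal 'O' run; same O(n) cost.

-- ===== PORT A =====
-- for i in range(len(string)): per-character update of (c, s)
def Quize (string : String) : Int :=
  (string.toList.foldl
    (fun (cs : Int × Int) ch =>
      if ch = 'O' then (cs.1 + 1, cs.2 + (cs.1 + 1)) else (0, cs.2 + 0))
    (0, 0)).2

-- ===== PORT B =====
-- collect the lengths of maximal runs of 'O' (k is the current run length)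
def quizeRuns : List Char → Int → List Int
  | [], k => if k ≠ 0 then [k] else []
  | ch :: rest, k =>
      if ch = 'O' then quizeRuns rest (k + 1)
      else if k ≠ 0 then k :: quizeRuns rest 0 else quizeRuns rest 0

def Quize_alt (string : String) : Int :=
  (quizeRuns string.toList 0).foldl
    (fun s k => s + PySem.Int.floordiv (k * (k + 1)) 2) 0

-- ===== PRECONDITION & SPEC =====
def Spec_Quize (string : String) (out : Int) : Prop := out = Quize_alt string
instance (string : String) (out : Int) : Decidable (Spec_Quize string out) := by unfold Spec_Quize; infer_instance

-- ===== CLAIM (what is proved, stated in full; the proofs are below) =====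
def Claim_equal_Quize : Prop := ∀ (string : String), Dom_Quize string → Spec_Quize string (Quize string)

-- ===== LEMMAS AND PROOFS =====

def quizeTri (k : Int) : Int := PySem.Int.floordiv (k * (k + 1)) 2

lemma quizeTri_succ (k : Int) : quizeTri (k + 1) = quizeTri k + (k + 1) := by
  obtain ⟨m, hm⟩ : Even (k * (k + 1)) := Int.even_mul_succ_self k
  unfold quizeTri
  have h1 : k * (k + 1) = m * 2 := by linarith
  have h2 : (k + 1) * (k + 1 + 1) = (m + (k + 1)) * 2 := by ring_nf; linarith
  rw [h1, h2, PySem.Int.floordiv_eq_ediv_of_pos (by norm_num),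
      PySem.Int.floordiv_eq_ediv_of_pos (by norm_num),
      Int.mul_ediv_cancel _ (by norm_num), Int.mul_ediv_cancel _ (by norm_num)]

lemma quizeTri_zero : quizeTri 0 = 0 := by decide

def quizeSum (l : List Int) : Int := l.foldl (fun s k => s + quizeTri k) 0

lemma quizeSum_eq (l : List Int) : quizeSum l = (l.map quizeTri).sum := by
  unfold quizeSum
  rw [PySem.List.foldl_add]
  ring

lemma quizeSum_cons (k : Int) (l : List Int) :
    quizeSum (k :: l) = quizeTri k + quizeSum l := by
  simp [quizeSum_eq]

lemma quize_invariant (l : List Char) (c s : Int) :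
    (l.foldl
      (fun (cs : Int × Int) ch =>
        if ch = 'O' then (cs.1 + 1, cs.2 + (cs.1 + 1)) else (0, cs.2 + 0))
      (c, s)).2 = s + quizeSum (quizeRuns l c) - quizeTri c := by
  induction l generalizing c s with
  | nil =>
      simp only [List.foldl_nil, quizeRuns]
      split_ifs with h
      · simp [quizeSum]
      · push Not at h
        rw [h, quizeTri_zero]
        simp [quizeSum]
  | cons ch rest ih =>
      simp only [List.foldl_cons, quizeRuns]
      by_cases hch : ch = 'O'
      · simp only [hch, if_true]
        rw [ih, quizeTri_succ]
        ring
      · simp only [hch, if_false]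
        rw [ih]
        split_ifs with hc
        · rw [quizeSum_cons, quizeTri_zero]; ring
        · push Not at hc
          rw [hc, quizeTri_zero]; ring

-- ===== VERDICT (by name: the statement is the Claim_ definition above) =====
theorem Quize_spec : Claim_equal_Quize := by
  intro string _
  show Quize string = Quize_alt string
  unfold Quize
  rw [quize_invariant]
  show 0 + quizeSum (quizeRuns string.toList 0) - quizeTri 0 = quizeSum (quizeRuns string.toList 0)
  rw [quizeTri_zero]
  ring
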